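-- pv_equiv track=rewrite | github.com/dmitryonin/Complex-Work-2-Sem | КТ2 1.py | calculate_bits
-- ===== SOURCE A (Python) =====
-- def calculate_bits(text, codes):
--     freq = {}
--     for char in text:
--         if char in freq:
--             freq[char] += 1
--         else:
--             freq[char] = 1
--
--     total_bits = 0
--     for char in freq:
--         code_length = 0
--         for _ in codes[char]:
--             code_length += 1
--         total_bits += code_length * freq[char]
--     return total_bits
-- ===== SOURCE B (Python) =====
-- def calculate_bits(text, codes):
--     return sum(len(codes[c]) for c in text)
-- ===== Notes on version B (the rewrite author's own statement) =====
-- stated objective: simpler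
-- what changed: Drops the frequency dictionary and its per-distinct-char counting loop: a single pass over text sums len(codes[c]) directly, weighting each code length implicitly by occurrence.
import Mathlib
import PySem

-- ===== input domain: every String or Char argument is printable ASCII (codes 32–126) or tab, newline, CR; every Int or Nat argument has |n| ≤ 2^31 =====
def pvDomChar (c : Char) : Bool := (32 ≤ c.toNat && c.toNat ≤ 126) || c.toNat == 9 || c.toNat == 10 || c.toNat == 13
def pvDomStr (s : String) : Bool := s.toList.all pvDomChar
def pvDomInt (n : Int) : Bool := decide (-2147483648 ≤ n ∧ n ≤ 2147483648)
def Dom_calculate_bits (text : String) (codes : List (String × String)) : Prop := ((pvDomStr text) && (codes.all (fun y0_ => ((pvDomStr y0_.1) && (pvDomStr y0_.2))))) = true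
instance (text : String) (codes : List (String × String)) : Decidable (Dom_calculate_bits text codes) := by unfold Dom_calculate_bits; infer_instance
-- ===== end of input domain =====

-- B drops A's frequency dictionary and per-distinct-char counting loop: one direct pass over text summing len(codes[c]).


-- ===== PORT A =====
def calculate_bits (text : String) (codes : List (String × String)) : Int :=
  -- freq = {}; for char in text: if char in freq: freq[char] += 1 else: freq[char] = 1
  let freq : PySem.Dict Char Int :=
    text.toList.foldl
      (fun d ch => if d.contains ch then d.insert ch (d.getD ch 0 + 1) else d.insert ch 1)
      PySem.Dict.empty
  -- total_bits = 0; for char in freq: code_length = 0; for _ in codes[char]: code_length += 1; total_bits += code_length * freq[char]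
  freq.keys.foldl
    (fun total ch =>
      let code : String :=  -- codes[char]: first-match lookup; "" stands for KeyError, excluded by Pre_
        match codes.find? (fun p => p.1 == String.ofList [ch]) with
        | some p => p.2
        | none => ""
      let code_length : Int := code.toList.foldl (fun n _ => n + 1) 0
      total + code_length * freq.getD ch 0)
    0

-- ===== PORT B =====
def calculate_bits_alt (text : String) (codes : List (String × String)) : Int :=
  -- sum(len(codes[c]) for c in text)
  text.toList.foldl
    (fun total ch =>
      total + PySem.Str.len
        (match codes.find? (fun p => p.1 == String.ofList [ch]) with  -- codes[c]; "" stands for KeyError, excluded by Pre_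
         | some p => p.2
         | none => ""))
    0

-- ===== PRECONDITION & SPEC =====
-- Pre_ excludes texts containing a character that is not a key of codes: Python A (and B) raise KeyError there.
def Pre_calculate_bits (text : String) (codes : List (String × String)) : Prop :=
  text.toList.all (fun ch => codes.any (fun p => p.1.toList == [ch])) = true
instance (text : String) (codes : List (String × String)) : Decidable (Pre_calculate_bits text codes) := by
  unfold Pre_calculate_bits; infer_instance
def pvWitness_calculate_bits : String × (List (String × String)) := ("abba", [("a", "0"), ("b", "10")])
def Spec_calculate_bits (text : String) (codes : List (String × String)) (out : Int) : Prop := out = calculate_bits_alt text codes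
instance (text : String) (codes : List (String × String)) (out : Int) : Decidable (Spec_calculate_bits text codes out) := by unfold Spec_calculate_bits; infer_instance

-- ===== CLAIM (what is proved, stated in full; the proofs are below) =====
def Claim_equal_calculate_bits : Prop := ∀ (text : String) (codes : List (String × String)), Dom_calculate_bits text codes → Pre_calculate_bits text codes → Spec_calculate_bits text codes (calculate_bits text codes)

-- ===== LEMMAS AND PROOFS =====

-- A's branching update 'if char in freq: freq[char] += 1 else: freq[char] = 1' is Counter(text).
lemma freq_eq_counter (l : List Char) :
    l.foldl (fun d ch => if d.contains ch then d.insert ch (d.getD ch 0 + 1) else d.insert ch 1)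
      PySem.Dict.empty = PySem.Dict.counter l := by
  have hf : (fun (d : PySem.Dict Char Int) ch =>
      if d.contains ch then d.insert ch (d.getD ch 0 + 1) else d.insert ch 1)
      = fun d ch => d.insert ch (d.getD ch 0 + 1) := by
    funext d ch
    by_cases h : d.contains ch
    · simp [h]
    · have h0 : d.getD ch (0 : Int) = 0 := by
        rw [PySem.Dict.getD_of_not_contains]
        simpa using h
      simp [h, h0]
  rw [hf, PySem.Dict.foldl_insert_getD_add_one_eq_counter]

-- Σ over a nodup key list covering l of f k · (count of k in l) = Σ over l of f.
lemma sum_mul_count (d : List Char) (hd : d.Nodup) (f : Char → Int) :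
    ∀ l : List Char, (∀ c ∈ l, c ∈ d) →
      (d.map (fun k => f k * (l.count k : Int))).sum = (l.map f).sum := by
  intro l
  induction l with
  | nil => simp
  | cons x xs ih =>
    intro hsub
    have hx : x ∈ d := hsub x (by simp)
    have hxs : ∀ c ∈ xs, c ∈ d := fun c hc => hsub c (by simp [hc])
    have hcount : ∀ k, ((x :: xs).count k : Int) = (xs.count k : Int) + (if x = k then 1 else 0) := by
      intro k
      by_cases h : x = k <;> simp [h]
    have hfun : (fun k : Char => f k * ((x :: xs).count k : Int))
        = (fun k => f k * (xs.count k : Int) + (if x = k then f k else 0)) := by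
      funext k
      rw [hcount k]
      by_cases h : x = k <;> simp [h] <;> ring
    have hsplit : (d.map (fun k => f k * ((x :: xs).count k : Int))).sum
        = (d.map (fun k => f k * (xs.count k : Int))).sum
          + (d.map (fun k => if x = k then f k else 0)).sum := by
      rw [hfun, List.sum_map_add]
    have hind : ∀ d' : List Char, d'.Nodup → x ∈ d' →
        (d'.map (fun k => if x = k then f k else 0)).sum = f x := by
      intro d'
      induction d' with
      | nil => simp
      | cons y ys ihy =>
        intro hnd hmem
        rcases List.mem_cons.mp hmem with h | h
        · subst h
          have : x ∉ ys := (List.nodup_cons.mp hnd).1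
          have hz : (ys.map (fun k => if x = k then f k else 0)).sum = 0 := by
            apply List.sum_eq_zero
            intro z hz
            rcases List.mem_map.mp hz with ⟨k, hk, rfl⟩
            have : x ≠ k := fun he => this (he ▸ hk)
            simp [this]
          simp [hz]
        · have hne : x ≠ y := by
            rintro rfl
            exact (List.nodup_cons.mp hnd).1 h
          simp [hne, ihy (List.nodup_cons.mp hnd).2 h]
    rw [hsplit, ih hxs, hind d hd hx]
    simp [add_comm]

-- counting a string's characters one by one is its length
lemma foldl_count_len (s : List Char) (a : Int) : s.foldl (fun n _ => n + 1) a = a + s.length := by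
  induction s generalizing a with
  | nil => simp
  | cons c cs ih => simp [List.foldl_cons, ih]; ring

-- ===== VERDICT (by name: the statement is the Claim_ definition above) =====
theorem calculate_bits_spec : Claim_equal_calculate_bits := by
  intro text codes _ _
  unfold Spec_calculate_bits calculate_bits calculate_bits_alt
  rw [freq_eq_counter]
  rw [PySem.List.foldl_add, PySem.List.foldl_add]
  rw [PySem.Dict.keys_counter]
  simp only [PySem.Dict.getD_counter, foldl_count_len, PySem.Str.len_eq, zero_add]
  exact sum_mul_count (PySem.Set.ofList text.toList) (PySem.Set.nodup_ofList _) _ text.toList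
    (fun c hc => (PySem.Set.mem_ofList _ _).mpr hc)
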